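-- pv_equiv track=rewrite | github.com/aeyoll/soundclone | core/audio.py | deinterleave
-- ===== SOURCE A (Python) =====
-- def deinterleave(data, channel_count):  # noqa: D103
--     # first step is to separate the values for each audio channel and min/max
--     # value pair, hence we get an array with channel_count * 2 arrays
--     deinterleaved = [data[idx::channel_count * 2] for idx in range(channel_count * 2)]
--     new_data = []
--
--     # this second step combines each min and max value again in one array,
--     # so we have one array for each channel
--     for ch in range(channel_count):
--         idx1 = 2 * ch
--         idx2 = 2 * ch + 1
--         ch_data = [None] * (len(deinterleaved[idx1]) + len(deinterleaved[idx2]))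
--         ch_data[::2] = deinterleaved[idx1]
--         ch_data[1::2] = deinterleaved[idx2]
--         new_data.append(ch_data)
--
--     return new_data
-- ===== SOURCE B (Python) =====
-- def deinterleave(data, channel_count):
--     # route each sample straight to its channel by index arithmetic:
--     # element i belongs to channel (i % (channel_count*2)) // 2
--     stride = channel_count * 2
--     return [
--         [data[i] for i in range(len(data)) if (i % stride) // 2 == ch]
--         for ch in range(channel_count)
--     ]
-- ===== Notes on version B (the rewrite author's own statement) =====
-- stated objective: simpler
-- what changed: Replaces A's two-phase strided-slice split plus slice-assignment merge with a direct comprehension that routes each element to its channel by index arithmetic (i % (2*channel_count)) // 2.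
import Mathlib
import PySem

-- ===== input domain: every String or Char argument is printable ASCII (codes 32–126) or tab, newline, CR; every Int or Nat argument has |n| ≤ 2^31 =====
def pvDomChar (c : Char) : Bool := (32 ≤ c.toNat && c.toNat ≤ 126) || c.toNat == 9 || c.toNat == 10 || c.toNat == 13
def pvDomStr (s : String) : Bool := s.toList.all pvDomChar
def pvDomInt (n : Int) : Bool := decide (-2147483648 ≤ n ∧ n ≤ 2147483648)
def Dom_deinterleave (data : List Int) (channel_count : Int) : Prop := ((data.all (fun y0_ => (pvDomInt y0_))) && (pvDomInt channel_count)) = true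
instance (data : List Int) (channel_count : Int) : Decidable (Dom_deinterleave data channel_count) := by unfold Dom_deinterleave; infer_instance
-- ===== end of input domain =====

-- B replaces A's strided-slice split + slice-assignment merge by one comprehension that
-- routes each element to its channel via (i % (2*channel_count)) // 2; objective: simpler.

-- ===== PORT A =====
-- Port of A's slice-assignment merge: ch_data[::2] = l1; ch_data[1::2] = l2.
-- Exact whenever l1.length - l2.length ∈ {0, 1}, which always holds for the two
-- strided slices A feeds it (Python's extended-slice assignment demands equal lengths).
def pvMergeSlices : List Int → List Int → List Int
  | [], ys => ys
  | x :: xs, ys => x :: pvMergeSlices ys xs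
  termination_by xs ys => xs.length + ys.length

def deinterleave (data : List Int) (channel_count : Int) : List (List Int) :=
  let deinterleaved := (PySem.List.pyRange 0 (channel_count * 2) 1).map
    (fun idx => (PySem.List.slice? data (some idx) none (channel_count * 2)).getD [])
  (PySem.List.pyRange 0 channel_count 1).foldl
    (fun new_data ch =>
      new_data ++ [pvMergeSlices (PySem.List.pyGetD deinterleaved (2 * ch) [])
                                 (PySem.List.pyGetD deinterleaved (2 * ch + 1) [])])
    []

-- ===== PORT B =====
def deinterleave_alt (data : List Int) (channel_count : Int) : List (List Int) :=
  let stride := channel_count * 2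
  (PySem.List.pyRange 0 channel_count 1).map (fun ch =>
    ((PySem.List.pyRange 0 (PySem.List.len data) 1).filter
        (fun i => decide (PySem.Int.floordiv (PySem.Int.mod i stride) 2 = ch))).map
      (fun i => PySem.List.pyGetD data i 0))

-- ===== PRECONDITION & SPEC =====
def Spec_deinterleave (data : List Int) (channel_count : Int) (out : List (List Int)) : Prop := out = deinterleave_alt data channel_count
instance (data : List Int) (channel_count : Int) (out : List (List Int)) : Decidable (Spec_deinterleave data channel_count out) := by unfold Spec_deinterleave; infer_instance

-- ===== CLAIM (what is proved, stated in full; the proofs are below) =====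
def Claim_equal_deinterleave : Prop := ∀ (data : List Int) (channel_count : Int), Dom_deinterleave data channel_count → Spec_deinterleave data channel_count (deinterleave data channel_count)

-- ===== LEMMAS AND PROOFS =====

def pvStrided : List Int → Nat → Nat → List Int
  | [], _, _ => []
  | x :: xs, 0, st => x :: pvStrided xs (st - 1) st
  | _ :: xs, a + 1, st => pvStrided xs a st

theorem pvStrided_getElem? (xs : List Int) (a st : Nat) (hst : 0 < st) :
    ∀ k : Nat, (pvStrided xs a st)[k]? = xs[a + st * k]? := by
  induction xs generalizing a with
  | nil => intro k; simp [pvStrided]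
  | cons x xs ih =>
    intro k
    match a with
    | 0 =>
      match k with
      | 0 => simp [pvStrided]
      | k + 1 =>
        have h : 0 + st * (k + 1) = (st - 1 + st * k) + 1 := by
          rw [Nat.mul_succ]; omega
        simp only [pvStrided, h, List.getElem?_cons_succ]
        exact ih (st - 1) k
    | a + 1 =>
      simp only [pvStrided,
        show a + 1 + st * k = (a + st * k) + 1 by omega, List.getElem?_cons_succ]
      exact ih a k

theorem pvSL (xs : List Int) (a : Nat) (st : Int) (hst : 0 < st) :
    PySem.List.slice? xs (some (a : Int)) none st = some (pvStrided xs a st.toNat) := by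
  have hne : st ≠ 0 := by omega
  have hnlt : ¬ st < 0 := by omega
  have hna : ¬ ((a : Int) < 0) := by omega
  have hstn : (st.toNat : Int) = st := Int.toNat_of_nonneg (le_of_lt hst)
  have hstn0 : 0 < st.toNat := by omega
  simp only [PySem.List.slice?, PySem.List.sliceIndices, hne, if_neg hnlt, if_neg hna,
    if_false, if_pos hst, Option.some.injEq]
  by_cases hlt : a < xs.length
  · have hmin : min (a : Int) (xs.length : Int) = (a : Int) := by
      rw [min_eq_left]; exact_mod_cast le_of_lt hlt
    have hcond : min (a : Int) (xs.length : Int) < (xs.length : Int) := by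
      rw [hmin]; exact_mod_cast hlt
    rw [hmin, if_pos (show (a:Int) < (xs.length:Int) by exact_mod_cast hlt)]
    have key : ∀ k : Nat, (k < (((xs.length : Int) - a + st - 1) / st).toNat ↔ a + st.toNat * k < xs.length) := by
      intro k
      rw [Int.lt_toNat, Int.lt_iff_add_one_le, Int.le_ediv_iff_mul_le hst]
      have hm : ((k : Int) + 1) * st = st * k + st := by ring
      have h2 : ((a + st.toNat * k : Nat) : Int) = (a : Int) + st * k := by push_cast [hstn]; ring
      rw [hm]
      omega
    have hcg : ∀ j ∈ List.range (((xs.length : Int) - a + st - 1) / st).toNat,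
        xs[((a : Int) + st * (j : Int)).toNat]? = some (xs.getD (a + st.toNat * j) 0) := by
      intro j hj
      rw [List.mem_range] at hj
      have hjn : a + st.toNat * j < xs.length := (key j).mp hj
      have hidx : ((a : Int) + st * (j : Int)).toNat = a + st.toNat * j := by
        have : ((a + st.toNat * j : Nat) : Int) = (a : Int) + st * j := by push_cast [hstn]; ring
        omega
      rw [hidx, List.getElem?_eq_getElem hjn, List.getD_eq_getElem _ _ hjn]
    rw [List.filterMap_congr hcg,
      show (fun j => some (xs.getD (a + st.toNat * j) 0)) = (some ∘ (fun j => xs.getD (a + st.toNat * j) 0)) from rfl,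
      List.filterMap_eq_map]
    apply List.ext_getElem?
    intro k
    rw [pvStrided_getElem? xs a st.toNat hstn0 k, List.getElem?_map]
    by_cases hk : k < (((xs.length : Int) - a + st - 1) / st).toNat
    · have hkn : a + st.toNat * k < xs.length := (key k).mp hk
      rw [List.getElem?_range hk, List.getElem?_eq_getElem hkn]
      simp only [Option.map_some]
      rw [List.getD_eq_getElem _ _ hkn]
    · have hkn : ¬ (a + st.toNat * k < xs.length) := fun h => hk ((key k).mpr h)
      rw [List.getElem?_eq_none (show xs.length ≤ a + st.toNat * k by omega),
        List.getElem?_eq_none (show (List.range _).length ≤ k by simpa using Nat.le_of_not_lt hk)]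
      rfl
  · -- a ≥ length: both empty
    have hmin : min (a : Int) (xs.length : Int) = (xs.length : Int) := by
      rw [min_eq_right]; exact_mod_cast Nat.le_of_not_lt hlt
    rw [hmin, if_neg (lt_irrefl _), List.range_zero, List.filterMap_nil]
    apply List.ext_getElem?
    intro k
    rw [pvStrided_getElem? xs a st.toNat hstn0 k,
      List.getElem?_eq_none (show xs.length ≤ a + st.toNat * k by omega)]
    rfl

def pvCdec (st a : Nat) : Nat := if a = 0 then st - 1 else a - 1

def pvG (st : Nat) : Nat → Nat → List Int → List Int
  | _, _, [] => []
  | a, b, x :: xs =>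
    let rest := pvG st (pvCdec st a) (pvCdec st b) xs
    if a = 0 || b = 0 then x :: rest else rest

theorem pvG_comm (st : Nat) (a b : Nat) (xs : List Int) :
    pvG st a b xs = pvG st b a xs := by
  induction xs generalizing a b with
  | nil => rfl
  | cons x xs ih => simp only [pvG, ih (pvCdec st a) (pvCdec st b), Bool.or_comm]

theorem pvMERGE (xs : List Int) (a b st : Nat) (hab : a < b) (hb : b < st) :
    pvMergeSlices (pvStrided xs a st) (pvStrided xs b st) = pvG st a b xs := by
  induction xs generalizing a b with
  | nil =>
    simp [pvStrided, pvMergeSlices, pvG]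
  | cons x xs ih =>
    match a with
    | 0 =>
      have hb1 : b - 1 < st - 1 := by omega
      have hst1 : st - 1 < st := by omega
      obtain ⟨b', rfl⟩ : ∃ b', b = b' + 1 := ⟨b - 1, by omega⟩
      simp only [pvStrided, pvMergeSlices, pvG, pvCdec, if_neg (Nat.succ_ne_zero b'), if_true]
      rw [ih b' (st - 1) (by omega) (by omega), pvG_comm]
      simp
    | a' + 1 =>
      obtain ⟨b', rfl⟩ : ∃ b', b = b' + 1 := ⟨b - 1, by omega⟩
      simp only [pvStrided, pvG, pvCdec, if_neg (Nat.succ_ne_zero a'), if_neg (Nat.succ_ne_zero b')]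
      rw [if_neg (by simp)]
      exact ih a' b' (by omega) (by omega)

theorem pvSubOne_emod (u st : Int) (hst : 1 < st) :
    (u - 1) % st = (if u % st = 0 then st - 1 else u % st - 1) := by
  have hb : (0:Int) < st := by omega
  have hmod : (u - 1) % st = (u % st - 1) % st := by
    conv_lhs => rw [Int.sub_emod]
    rw [Int.sub_emod (u % st)]
    simp [Int.emod_emod_of_dvd]
  have h0 : 0 ≤ u % st := Int.emod_nonneg u (by omega)
  have h1 : u % st < st := Int.emod_lt_of_pos u hb
  rw [hmod]
  by_cases h : u % st = 0
  · rw [if_pos h, h]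
    have h2 : (-1 + st * 1) % st = (-1 : Int) % st := Int.add_mul_emod_self_left (-1) st 1
    have h3 : (-1 + st * 1 : Int) = st - 1 := by ring
    rw [show ((0:Int) - 1) = (-1 : Int) by ring, ← h2, h3, Int.emod_eq_of_lt (by omega) (by omega)]
  · rw [if_neg h, Int.emod_eq_of_lt (by omega) (by omega)]

theorem pvCdec_emod (t i st : Int) (hst : 1 < st) :
    ((t - (i + 1)) % st).toNat = pvCdec st.toNat ((t - i) % st).toNat := by
  have h0 : 0 ≤ (t - i) % st := Int.emod_nonneg _ (by omega)
  have h1 : (t - i) % st < st := Int.emod_lt_of_pos _ (by omega)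
  have he : t - (i + 1) = (t - i) - 1 := by ring
  rw [he, pvSubOne_emod _ _ hst, pvCdec]
  by_cases h : (t - i) % st = 0
  · rw [if_pos h, if_pos (by omega)]
    omega
  · rw [if_neg h, if_neg (by omega)]
    omega

theorem pvDvd_small (st d : Int) (hd : st ∣ d) (h1 : -st < d) (h2 : d < st) : d = 0 := by
  rcases hd with ⟨q, hq⟩; subst hq
  rcases lt_trichotomy q 0 with h | h | h
  · nlinarith
  · simp [h]
  · nlinarith

theorem pvCond_iff (i ch st : Int) (hch : 0 ≤ ch) (hlt : 2 * ch + 1 < st) :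
    (PySem.Int.floordiv (PySem.Int.mod i st) 2 = ch) ↔
      (((2 * ch - i) % st).toNat = 0 ∨ ((2 * ch + 1 - i) % st).toNat = 0) := by
  have hst : (0:Int) < st := by omega
  have hr0 : 0 ≤ i % st := Int.emod_nonneg _ (by omega)
  have hr1 : i % st < st := Int.emod_lt_of_pos _ hst
  rw [PySem.Int.mod_eq_emod_of_pos hst, PySem.Int.floordiv_eq_ediv_of_pos (by omega)]
  have key : ∀ t : Int, 0 ≤ t → t < st → (((t - i) % st).toNat = 0 ↔ i % st = t) := by
    intro t ht0 ht1
    have hmod : (t - i) % st = (t - i % st) % st := by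
      conv_lhs => rw [Int.sub_emod]
      rw [Int.sub_emod t (i % st)]
      simp [Int.emod_emod_of_dvd]
    have hnn : 0 ≤ (t - i) % st := Int.emod_nonneg _ (by omega)
    constructor
    · intro h
      have hz : (t - i % st) % st = 0 := by omega
      have hdvd : st ∣ (t - i % st) := (PySem.Int.emod_eq_zero_iff_dvd _ _).mp hz
      have := pvDvd_small st _ hdvd (by omega) (by omega)
      omega
    · intro h
      rw [hmod, h]
      simp
  rw [key (2 * ch) (by omega) (by omega), key (2 * ch + 1) (by omega) (by omega)]
  omega

theorem pvEG (xs : List Int) (ch st : Int) (hch : 0 ≤ ch) (hlt : 2 * ch + 1 < st) :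
    ∀ i : Int,
      (PySem.List.enumerate xs i).filterMap
          (fun p => if PySem.Int.floordiv (PySem.Int.mod p.1 st) 2 = ch then some p.2 else none)
        = pvG st.toNat (((2 * ch - i) % st).toNat) (((2 * ch + 1 - i) % st).toNat) xs := by
  induction xs with
  | nil => intro i; simp [PySem.List.enumerate_nil, pvG]
  | cons x xs ih =>
    intro i
    rw [PySem.List.enumerate_cons, List.filterMap_cons]
    have hcond := pvCond_iff i ch st hch hlt
    rw [show pvG st.toNat (((2 * ch - i) % st).toNat) (((2 * ch + 1 - i) % st).toNat) (x :: xs)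
        = (let rest := pvG st.toNat (pvCdec st.toNat (((2 * ch - i) % st).toNat))
                         (pvCdec st.toNat (((2 * ch + 1 - i) % st).toNat)) xs
           if (((2 * ch - i) % st).toNat = 0 : Bool) || (((2 * ch + 1 - i) % st).toNat = 0 : Bool)
           then x :: rest else rest) from rfl]
    rw [← pvCdec_emod (2 * ch) i st (by omega), ← pvCdec_emod (2 * ch + 1) i st (by omega)]
    by_cases h : PySem.Int.floordiv (PySem.Int.mod i st) 2 = ch
    · rw [if_pos h]
      have : ((((2 * ch - i) % st).toNat = 0 : Bool) || (((2 * ch + 1 - i) % st).toNat = 0 : Bool)) = true := by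
        rcases hcond.mp h with h' | h' <;> simp [h']
      rw [this, if_pos rfl, ih (i + 1)]
    · rw [if_neg h]
      have : ((((2 * ch - i) % st).toNat = 0 : Bool) || (((2 * ch + 1 - i) % st).toNat = 0 : Bool)) = false := by
        have := fun h' => h (hcond.mpr h')
        simp only [Bool.or_eq_false_iff, decide_eq_false_iff_not]
        omega
      rw [this, if_neg (by simp), ih (i + 1)]

theorem pvFilter_map_eq_filterMap (p : Int → Bool) (f : Int → Int) (l : List Int) :
    (l.filter p).map f = l.filterMap (fun a => if p a then some (f a) else none) := by
  induction l with
  | nil => rfl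
  | cons x xs ih =>
    simp only [List.filter_cons, List.filterMap_cons]
    split <;> simp_all


theorem main_eq (data : List Int) (channel_count : Int) :
    deinterleave data channel_count = deinterleave_alt data channel_count := by
  unfold deinterleave deinterleave_alt
  simp only [PySem.List.foldl_append_singleton_eq_map, List.nil_append]
  apply List.map_congr_left
  intro ch hch
  rw [PySem.List.mem_pyRange_one] at hch
  obtain ⟨hch0, hchc⟩ := hch
  have hcc : 1 ≤ channel_count := by omega
  have hst2 : 2 ≤ channel_count * 2 := by omega
  have hlt : 2 * ch + 1 < channel_count * 2 := by omega
  -- A side: resolve the two strided slices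
  have hn : (channel_count * 2) = (((channel_count * 2).toNat : Nat) : Int) := by omega
  have hk1 : (2 * ch) = (((2 * ch).toNat : Nat) : Int) := by omega
  have hk2 : (2 * ch + 1) = (((2 * ch + 1).toNat : Nat) : Int) := by omega
  rw [hk2, hk1]
  conv_lhs => rw [hn]
  rw [PySem.List.pyGetD_map_pyRange _ _ _ _ (by omega),
      PySem.List.pyGetD_map_pyRange _ _ _ _ (by omega)]
  rw [← hn]
  rw [pvSL data _ _ (by omega), pvSL data _ _ (by omega)]
  simp only [Option.getD_some]
  rw [pvMERGE data _ _ _ (by omega) (by omega)]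
  -- B side
  rw [pvFilter_map_eq_filterMap]
  simp only [decide_eq_true_eq]
  have hfm := pvEG data ch (channel_count * 2) hch0 hlt 0
  rw [PySem.List.enumerate_eq_map_pyRange data 0, List.filterMap_map] at hfm
  simp only [Function.comp] at hfm
  rw [Int.sub_zero, Int.sub_zero, Int.emod_eq_of_lt (by omega) (by omega),
    Int.emod_eq_of_lt (by omega) (by omega)] at hfm
  rw [show ((((2 * ch).toNat : Int) + 1).toNat) = (2 * ch + 1).toNat from by omega]
  exact hfm.symm


-- ===== VERDICT (by name: the statement is the Claim_ definition above) =====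
theorem deinterleave_spec : Claim_equal_deinterleave := by
  intro data channel_count _hdom
  unfold Spec_deinterleave
  exact main_eq data channel_count
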